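-- pv_equiv track=rewrite | github.com/lbvx/CP-Problems | codeforces/855/F.py | diffLetters
-- ===== SOURCE A (Python) =====
-- def diffLetters(s):
--     sset = set(s)
--     if len(set(s)) != 25:
--         return False
--
--     for c in sset:
--         if s.count(c) % 2 == 0:
--             return False
--
--     return True
-- ===== SOURCE B (Python) =====
-- def diffLetters(s):
--     seen = set()
--     odd = set()
--     for c in s:
--         seen.add(c)
--         if c in odd:
--             odd.discard(c)
--         else:
--             odd.add(c)
--     return len(seen) == 25 and len(odd) == 25
-- ===== Notes on version B (the rewrite author's own statement) =====
-- stated objective: alternative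
-- what changed: Replaced A's build-set-then-recount (s.count(c) rescans the string for each distinct char) with a single left-to-right pass maintaining a seen-set and an odd-parity toggle set, returning True iff both have exactly 25 elements.
import Mathlib
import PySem

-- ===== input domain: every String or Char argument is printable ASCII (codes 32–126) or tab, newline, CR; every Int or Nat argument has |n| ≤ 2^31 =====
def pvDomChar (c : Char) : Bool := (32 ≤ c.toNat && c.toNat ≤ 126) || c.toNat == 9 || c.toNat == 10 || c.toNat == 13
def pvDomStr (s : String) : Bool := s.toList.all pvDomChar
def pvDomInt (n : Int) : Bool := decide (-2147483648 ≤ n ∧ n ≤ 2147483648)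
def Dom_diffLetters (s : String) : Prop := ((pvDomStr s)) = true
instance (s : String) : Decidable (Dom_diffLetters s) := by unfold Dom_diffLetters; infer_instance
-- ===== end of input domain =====

-- B replaces A's "build set(s), then re-count each distinct char over s" with a single
-- left-to-right pass maintaining a seen-set and an odd-parity toggle set (objective: alternative).

-- ===== PORT A =====
-- the 'for c in sset' loop with early 'return False'; result is order-independent (all-or-nothing)
def diffLettersLoop (s : List Char) : List Char → Bool
  | [] => true
  | c :: rest => if s.count c % 2 == 0 then false else diffLettersLoop s rest

def diffLetters (s : String) : Bool :=
  let sset : PySem.Set Char := PySem.Set.ofList s.toList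
  if (PySem.Set.ofList s.toList).length ≠ 25 then false
  else diffLettersLoop s.toList sset

-- the folded step function of B's loop, named for the proofs


-- ===== PORT B =====
def diffLetters_alt (s : String) : Bool :=
  let st := s.toList.foldl
    (fun (p : PySem.Set Char × PySem.Set Char) c =>
      (PySem.Set.add p.1 c,
       if PySem.Set.contains p.2 c then PySem.Set.discard p.2 c else PySem.Set.add p.2 c))
    (PySem.Set.empty, PySem.Set.empty)
  decide (st.1.length = 25) && decide (st.2.length = 25)

-- ===== PRECONDITION & SPEC =====
def Spec_diffLetters (s : String) (out : Bool) : Prop := out = diffLetters_alt s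
instance (s : String) (out : Bool) : Decidable (Spec_diffLetters s out) := by unfold Spec_diffLetters; infer_instance

-- ===== CLAIM (what is proved, stated in full; the proofs are below) =====
def Claim_equal_diffLetters : Prop := ∀ (s : String), Dom_diffLetters s → Spec_diffLetters s (diffLetters s)

-- ===== LEMMAS AND PROOFS =====

-- B's loop body, named so the lemmas can speak about it (definitionally the lambda in diffLetters_alt)
def pvStep (p : PySem.Set Char × PySem.Set Char) (c : Char) : PySem.Set Char × PySem.Set Char :=
  (PySem.Set.add p.1 c,
   if PySem.Set.contains p.2 c then PySem.Set.discard p.2 c else PySem.Set.add p.2 c)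

theorem alt_eq (s : String) :
    diffLetters_alt s =
      (decide ((s.toList.foldl pvStep (PySem.Set.empty, PySem.Set.empty)).1.length = 25) &&
       decide ((s.toList.foldl pvStep (PySem.Set.empty, PySem.Set.empty)).2.length = 25)) := rfl

theorem diffLettersLoop_eq_all (s l : List Char) :
    diffLettersLoop s l = l.all (fun c => decide (s.count c % 2 = 1)) := by
  induction l with
  | nil => rfl
  | cons c rest ih =>
    simp only [diffLettersLoop, List.all_cons, ih]
    rcases Nat.mod_two_eq_zero_or_one (s.count c) with h | h <;> simp [h]

theorem foldB_inv (l : List Char) (seen odd : PySem.Set Char)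
    (hs : seen.Nodup) (ho : odd.Nodup) :
    (l.foldl pvStep (seen, odd)).1 = PySem.Set.update seen l ∧
    (l.foldl pvStep (seen, odd)).2.Nodup ∧
    ∀ c : Char, (c ∈ (l.foldl pvStep (seen, odd)).2 ↔ (c ∈ odd ↔ l.count c % 2 = 0)) := by
  induction l generalizing seen odd with
  | nil => exact ⟨rfl, ho, fun c => by simp⟩
  | cons a rest ih =>
    have hs' : (PySem.Set.add seen a).Nodup := PySem.Set.nodup_add _ _ hs
    by_cases hmem : a ∈ odd
    · have hstep : pvStep (seen, odd) a = (PySem.Set.add seen a, PySem.Set.discard odd a) := by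
        unfold pvStep; simp [hmem]
      obtain ⟨h1, h2, h3⟩ := ih (PySem.Set.add seen a) (PySem.Set.discard odd a) hs'
        (PySem.Set.nodup_discard _ _ ho)
      rw [List.foldl_cons, hstep]
      refine ⟨by rw [h1, PySem.Set.update_cons], h2, ?_⟩
      intro c
      rw [h3 c, PySem.Set.mem_discard]
      by_cases hca : c = a
      · subst hca
        simp only [hmem, ne_eq, not_true_eq_false, and_false, false_iff, true_iff,
          List.count_cons_self]
        rcases Nat.mod_two_eq_zero_or_one (rest.count c) with h0 | h0 <;> simp [h0] <;> omega
      · rw [List.count_cons_of_ne (Ne.symm hca)]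
        simp [hca]
    · have hstep : pvStep (seen, odd) a = (PySem.Set.add seen a, PySem.Set.add odd a) := by
        unfold pvStep; simp [hmem]
      obtain ⟨h1, h2, h3⟩ := ih (PySem.Set.add seen a) (PySem.Set.add odd a) hs'
        (PySem.Set.nodup_add _ _ ho)
      rw [List.foldl_cons, hstep]
      refine ⟨by rw [h1, PySem.Set.update_cons], h2, ?_⟩
      intro c
      rw [h3 c, PySem.Set.mem_add]
      by_cases hca : c = a
      · subst hca
        simp only [hmem, or_true, true_iff, false_iff, List.count_cons_self]
        rcases Nat.mod_two_eq_zero_or_one (rest.count c) with h0 | h0 <;> simp [h0] <;> omega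
      · rw [List.count_cons_of_ne (Ne.symm hca)]
        simp [hca]

theorem mem_of_odd_count (l : List Char) (c : Char) (h : l.count c % 2 = 1) : c ∈ l := by
  by_contra hn
  rw [List.count_eq_zero_of_not_mem hn] at h
  simp at h

theorem diffLetters_unfold (s : String) :
    diffLetters s = (if (PySem.Set.ofList s.toList).length ≠ 25 then false
      else (PySem.Set.ofList s.toList).all (fun c => decide (s.toList.count c % 2 = 1))) := by
  rw [show diffLetters s = (if (PySem.Set.ofList s.toList).length ≠ 25 then false
      else diffLettersLoop s.toList (PySem.Set.ofList s.toList)) from rfl,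
    diffLettersLoop_eq_all]

-- ===== VERDICT (by name: the statement is the Claim_ definition above) =====
theorem diffLetters_spec : Claim_equal_diffLetters := by
  intro s _
  unfold Spec_diffLetters
  obtain ⟨h1, h2, h3⟩ := foldB_inv s.toList PySem.Set.empty PySem.Set.empty
    List.nodup_nil List.nodup_nil
  rw [diffLetters_unfold, alt_eq]
  set l := s.toList with hl
  set st := l.foldl pvStep (PySem.Set.empty, PySem.Set.empty) with hst
  have hseen : st.1 = PySem.Set.ofList l := by
    rw [h1]; exact PySem.Set.update_nil_left l
  have hmem : ∀ c : Char, c ∈ st.2 ↔ l.count c % 2 = 1 := by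
    intro c
    rw [h3 c]
    constructor
    · intro h
      have : ¬ (l.count c % 2 = 0) := by
        intro h0
        exact (List.not_mem_nil (a := c)) (h.mpr h0)
      omega
    · intro h
      constructor
      · intro hc; exact absurd hc (List.not_mem_nil)
      · intro h0; omega
  have hperm : st.2.Perm ((PySem.Set.ofList l).filter (fun c => decide (l.count c % 2 = 1))) := by
    rw [List.perm_ext_iff_of_nodup h2 ((PySem.Set.nodup_ofList l).filter _)]
    intro c
    rw [hmem c, List.mem_filter]
    constructor
    · intro h
      exact ⟨by simpa [PySem.Set.mem_ofList] using mem_of_odd_count l c h, by simpa using h⟩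
    · intro h
      simpa using h.2
  have hlen2 : st.2.length = ((PySem.Set.ofList l).filter (fun c => decide (l.count c % 2 = 1))).length :=
    hperm.length_eq
  rw [hseen, hlen2]
  by_cases h25 : (PySem.Set.ofList l).length = 25
  · simp only [h25, ne_eq, not_true_eq_false, if_false, decide_true, Bool.true_and]
    have hiff : ((PySem.Set.ofList l).filter (fun c => decide (l.count c % 2 = 1))).length = 25 ↔
        ∀ c ∈ PySem.Set.ofList l, decide (l.count c % 2 = 1) = true := by
      constructor
      · intro he
        exact List.length_filter_eq_length_iff.mp (he.trans h25.symm)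
      · intro h
        exact (List.length_filter_eq_length_iff.mpr h).trans h25
    rw [Bool.eq_iff_iff]
    simp only [List.all_eq_true, decide_eq_true_eq, hiff, decide_eq_true_eq]
  · simp [h25]
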